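-- pv_equiv track=rewrite | github.com/sumitUG1956/SuSe_code | fast_api.py | _filter_by_expiry
-- ===== SOURCE A (Python) =====
-- def _filter_by_expiry(normalized: dict, expiry: str = None) -> tuple:
--     """
--     Filter normalized data by expiry.
--     Returns: (filtered_data, available_expiries)
--     """
--     if not normalized:
--         return {}, []
--
--     # Extract all available expiries from column names
--     available_expiries = set()
--     for col_name in normalized.keys():
--         # Column format: DEC24_24000CE_iv_diff_cumsum
--         if "_" in col_name:
--             exp = col_name.split("_")[0]
--             if exp and len(exp) >= 4 and exp[:3].isalpha():
--                 available_expiries.add(exp)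
--
--     available_expiries = sorted(available_expiries)
--
--     # If no expiry specified or invalid, return all
--     if not expiry or expiry not in available_expiries:
--         return normalized, available_expiries
--
--     # Filter only columns matching the expiry
--     filtered = {}
--     for col_name, values in normalized.items():
--         if col_name.startswith(f"{expiry}_"):
--             filtered[col_name] = values
--
--     return filtered, available_expiries
-- ===== SOURCE B (Python) =====
-- def _filter_by_expiry(normalized: dict, expiry: str = None) -> tuple:
--     """
--     Filter normalized data by expiry in a SINGLE pass: while scanning the
--     columns once we both record each valid expiry prefix and, when it equals
--     the requested expiry, collect the column into `filtered`.
--     Returns: (filtered_data, available_expiries)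
--     """
--     if not normalized:
--         return {}, []
--
--     seen = {}        # valid expiry prefixes (dict used as an ordered set)
--     filtered = {}
--     for col_name, values in normalized.items():
--         head, sep, _tail = col_name.partition("_")
--         if sep and len(head) >= 4 and head[:3].isalpha():
--             seen[head] = True
--             if head == expiry:
--                 filtered[col_name] = values
--
--     available_expiries = sorted(seen)
--
--     if expiry and expiry in seen:
--         return filtered, available_expiries
--     return normalized, available_expiries
-- ===== Notes on version B (the rewrite author's own statement) =====
-- stated objective: alternative
-- what changed: A scans twice (collect valid expiry prefixes into a set, then a second filtering scan with startswith); B is a single explicit pass that, per column, splits via str.partition and simultaneously records the valid prefix and collects the column whenever its prefix equals the requested expiry, so the second scan disappears.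
import Mathlib
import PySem

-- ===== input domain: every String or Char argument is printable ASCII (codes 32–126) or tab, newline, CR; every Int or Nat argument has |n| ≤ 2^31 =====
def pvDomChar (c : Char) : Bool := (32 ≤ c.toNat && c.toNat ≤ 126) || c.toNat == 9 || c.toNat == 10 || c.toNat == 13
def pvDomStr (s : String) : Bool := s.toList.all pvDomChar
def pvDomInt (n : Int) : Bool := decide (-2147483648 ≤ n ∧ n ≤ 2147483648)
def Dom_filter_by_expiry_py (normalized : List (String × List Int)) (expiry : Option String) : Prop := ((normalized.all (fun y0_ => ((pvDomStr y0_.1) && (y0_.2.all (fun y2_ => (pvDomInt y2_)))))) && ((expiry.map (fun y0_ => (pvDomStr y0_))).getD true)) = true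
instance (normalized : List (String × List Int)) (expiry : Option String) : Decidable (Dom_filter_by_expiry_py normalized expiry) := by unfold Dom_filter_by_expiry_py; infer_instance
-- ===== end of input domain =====

-- B replaces A's two scans (collect-expiries into a set, then a startswith filter pass) with
-- ONE explicit recursive pass that records each valid prefix AND collects matching columns
-- at the same time (objective: alternative decomposition, same asymptotic cost).

-- ===== PORT A =====
-- String work is ported on the char-list side (PySem.Chars), as PYSEM.md prescribes;
-- `col.split("_")[0]` is `.headD []` because Python's split always yields a non-empty list,
-- so the `[0]` never raises.
def filter_by_expiry_py (normalized : List (String × List Int)) (expiry : Option String) :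
    (List (String × List Int)) × List String :=
  if normalized.isEmpty then ([], [])
  else
    -- available_expiries = set(); for col_name in normalized.keys(): …
    let available : PySem.Set String :=
      normalized.foldl (fun acc kv =>
        if PySem.Chars.isIn ['_'] kv.1.toList then
          let exp := (PySem.Chars.splitOn kv.1.toList ['_']).headD []
          if (!exp.isEmpty) && decide (4 ≤ PySem.Chars.len exp) &&
              PySem.Chars.strIsalpha (PySem.Chars.slice exp none (some 3)) then
            PySem.Set.add acc (String.ofList exp)
          else acc
        else acc) PySem.Set.empty
    let availableSorted := PySem.List.sorted available (fun x => x) false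
    match expiry with
    | none => (normalized, availableSorted)    -- `not expiry` (None)
    | some e =>
      if e = "" || !(availableSorted.contains e) then (normalized, availableSorted)
      else
        -- filtered = {}; keep the columns starting with f"{expiry}_"
        let filtered : PySem.Dict String (List Int) :=
          normalized.foldl (fun d kv =>
            if PySem.Chars.startswith kv.1.toList (e.toList ++ ['_']) then
              d.insert kv.1 kv.2
            else d) PySem.Dict.empty
        (filtered.items, availableSorted)

-- ===== PORT B =====
-- The single pass of Source B's for-loop as structural recursion carrying BOTH accumulators
-- (seen : ordered set of valid prefixes, filtered : the matching columns).
-- `head, sep, _tail = col.partition("_")` is ported by hand (PySem has no partition):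
-- head = takeWhile (≠ '_'), and `sep` is truthy exactly when '_' occurs in col — exact.
def pvScan (expiry : Option String) :
    List (String × List Int) → PySem.Set String → PySem.Dict String (List Int) →
    PySem.Set String × PySem.Dict String (List Int)
  | [], seen, filtered => (seen, filtered)
  | (col, values) :: rest, seen, filtered =>
    let head := col.toList.takeWhile (· ≠ '_')
    if col.toList.contains '_' && decide (4 ≤ head.length) &&
        PySem.Chars.strIsalpha (head.take 3) then   -- head[:3] on a list is `take 3` — exact
      pvScan expiry rest (PySem.Set.add seen (String.ofList head))
        (if expiry == some (String.ofList head) then filtered.insert col values else filtered)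
    else pvScan expiry rest seen filtered

def filter_by_expiry_py_alt (normalized : List (String × List Int)) (expiry : Option String) :
    (List (String × List Int)) × List String :=
  match normalized with
  | [] => ([], [])
  | _ :: _ =>
    let sf := pvScan expiry normalized PySem.Set.empty PySem.Dict.empty
    let avail := PySem.List.sorted sf.1 (fun x => x) false
    match expiry with
    | none => (normalized, avail)
    | some e =>
      -- if expiry and expiry in seen: return filtered, available
      if (!(e == "")) && PySem.Set.contains sf.1 e then (sf.2.items, avail)
      else (normalized, avail)

-- ===== PRECONDITION & SPEC =====
def Spec_filter_by_expiry_py (normalized : List (String × List Int)) (expiry : Option String) (out : (List (String × List Int)) × List String) : Prop := out = filter_by_expiry_py_alt normalized expiry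
instance (normalized : List (String × List Int)) (expiry : Option String) (out : (List (String × List Int)) × List String) : Decidable (Spec_filter_by_expiry_py normalized expiry out) := by unfold Spec_filter_by_expiry_py; infer_instance

-- ===== CLAIM =====
def Claim_equal_filter_by_expiry_py : Prop := ∀ (normalized : List (String × List Int)) (expiry : Option String), Dom_filter_by_expiry_py normalized expiry → Spec_filter_by_expiry_py normalized expiry (filter_by_expiry_py normalized expiry)

-- ===== LEMMAS AND PROOFS =====
theorem pvGoAcc (sep : List Char) : ∀ (fuel : Nat) (l cur : List Char) (acc : List (List Char)),
    PySem.Chars.splitOn.go sep fuel l cur acc = acc.reverse ++ PySem.Chars.splitOn.go sep fuel l cur [] := by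
  intro fuel
  induction fuel with
  | zero => intro l cur acc; simp [PySem.Chars.splitOn.go]
  | succ n ih =>
    intro l cur acc
    cases l with
    | nil => simp [PySem.Chars.splitOn.go]
    | cons c rest =>
      simp only [PySem.Chars.splitOn.go]
      split
      · rw [ih _ _ (cur.reverse :: acc), ih _ _ [cur.reverse]]
        simp
      · exact ih _ _ _ |>.trans (by rw [ih rest (c :: cur) []])

theorem pvGoHead : ∀ (fuel : Nat) (l cur : List Char), l.length < fuel →
    (PySem.Chars.splitOn.go ['_'] fuel l cur []).headD [] = cur.reverse ++ l.takeWhile (· ≠ '_') := by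
  intro fuel
  induction fuel with
  | zero => intro l cur h; omega
  | succ n ih =>
    intro l cur h
    cases l with
    | nil => simp [PySem.Chars.splitOn.go]
    | cons c rest =>
      simp only [PySem.Chars.splitOn.go]
      by_cases hc : c = '_'
      · subst hc
        rw [if_pos (by simp [List.isPrefixOf])]
        rw [pvGoAcc]
        simp [List.takeWhile]
      · rw [if_neg (by simp [List.isPrefixOf]; exact fun h => hc h.symm)]
        rw [ih rest (c :: cur) (by simp at h ⊢; omega)]
        simp [List.takeWhile, hc]

-- s.split("_")[0] is the longest '_'-free prefix (i.e. s.partition("_")[0])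
theorem pvSplitOnHead (l : List Char) :
    (PySem.Chars.splitOn l ['_']).headD [] = l.takeWhile (· ≠ '_') := by
  rw [PySem.Chars.splitOn, pvGoHead _ _ _ (by omega)]
  simp

theorem pvTakeWhilePrefix (p : Char → Bool) (xs : List Char) (y : Char) (r : List Char)
    (h1 : ∀ x ∈ xs, p x) (h2 : p y = false) :
    (xs ++ y :: r).takeWhile p = xs := by
  induction xs with
  | nil => simp [h2]
  | cons a t ih =>
    simp only [List.cons_append, List.takeWhile_cons, h1 a (by simp)]
    rw [ih (fun x hx => h1 x (by simp [hx]))]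
    simp

-- "_" in col  is membership of '_'
theorem pvIsInEq (cs : List Char) : PySem.Chars.isIn ['_'] cs = cs.contains '_' := by
  rw [Bool.eq_iff_iff, PySem.Chars.isIn_iff_infix, List.singleton_infix_iff]; simp

-- exp[:3] on the char list is take 3
theorem pvSliceTake (l : List Char) : PySem.Chars.slice l none (some 3) = l.take 3 := by
  simp [pysem, PySem.List.slice]

-- A's per-column set condition equals B's (len >= 4 forces non-emptiness)
theorem pvCondEq (exp : List Char) :
    ((!exp.isEmpty) && decide (4 ≤ PySem.Chars.len exp) &&
        PySem.Chars.strIsalpha (PySem.Chars.slice exp none (some 3)))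
      = (decide (4 ≤ exp.length) && PySem.Chars.strIsalpha (exp.take 3)) := by
  rw [pvSliceTake, PySem.Chars.len_eq]
  cases exp with
  | nil => simp
  | cons c t =>
    have h : (decide ((4 : Int) ≤ (((c :: t).length : Nat) : Int)) : Bool)
        = decide (4 ≤ (c :: t).length) := by
      simp only [decide_eq_decide]
      omega
    rw [h]
    simp

-- col.startswith(expiry + "_")  ⟺  col contains '_' and its '_'-free prefix is expiry
theorem pvStartswithIff (e col : List Char) (he : '_' ∉ e) :
    PySem.Chars.startswith col (e ++ ['_']) = true ↔
      (col.contains '_' = true ∧ col.takeWhile (· ≠ '_') = e) := by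
  rw [PySem.Chars.startswith_iff]
  constructor
  · rintro ⟨r, hr⟩
    rw [List.append_assoc, List.singleton_append] at hr
    subst hr
    refine ⟨by simp, ?_⟩
    refine pvTakeWhilePrefix _ _ _ _ (fun x hx => ?_) (by simp)
    simp only [decide_eq_true_eq]
    rintro rfl
    exact he hx
  · rintro ⟨hin, hhead⟩
    have hmem : '_' ∈ col := by simpa using hin
    have hne : col.dropWhile (· ≠ '_') ≠ [] := by
      intro hnil
      rw [List.dropWhile_eq_nil_iff] at hnil
      have := hnil _ hmem
      simp at this
    have hhd : ((col.dropWhile (· ≠ '_')).head hne) = '_' := by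
      have := List.head_dropWhile_not (fun c => decide (c ≠ '_')) hne
      simpa using this
    have h2 : col.dropWhile (· ≠ '_') = '_' :: (col.dropWhile (· ≠ '_')).tail := by
      conv_lhs => rw [← List.cons_head_tail hne]
      rw [hhd]
    have hcol : col = e ++ '_' :: (col.dropWhile (· ≠ '_')).tail := by
      conv_lhs => rw [← List.takeWhile_append_dropWhile (p := (· ≠ '_')) (l := col)]
      rw [hhead]
      exact congrArg (e ++ ·) h2
    exact ⟨_, by rw [hcol, List.append_assoc, List.singleton_append]⟩


-- A's collect step, written in the shape of B's per-column test
theorem pvStepEq (seen : PySem.Set String) (col : String) :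
    (if PySem.Chars.isIn ['_'] col.toList then
       let exp := (PySem.Chars.splitOn col.toList ['_']).headD []
       if (!exp.isEmpty) && decide (4 ≤ PySem.Chars.len exp) &&
           PySem.Chars.strIsalpha (PySem.Chars.slice exp none (some 3)) then
         PySem.Set.add seen (String.ofList exp)
       else seen
     else seen)
    = (if col.toList.contains '_' && decide (4 ≤ (col.toList.takeWhile (· ≠ '_')).length) &&
          PySem.Chars.strIsalpha ((col.toList.takeWhile (· ≠ '_')).take 3) then
        PySem.Set.add seen (String.ofList (col.toList.takeWhile (· ≠ '_')))
      else seen) := by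
  simp only [pvIsInEq, pvSplitOnHead, pvCondEq]
  cases hin : col.toList.contains '_' <;> simp

-- the first component of B's single pass is exactly A's collect-loop
theorem pvScanFst (e? : Option String) : ∀ (l : List (String × List Int))
    (seen : PySem.Set String) (d : PySem.Dict String (List Int)),
    (pvScan e? l seen d).1
    = l.foldl (fun acc kv =>
        if PySem.Chars.isIn ['_'] kv.1.toList then
          let exp := (PySem.Chars.splitOn kv.1.toList ['_']).headD []
          if (!exp.isEmpty) && decide (4 ≤ PySem.Chars.len exp) &&
              PySem.Chars.strIsalpha (PySem.Chars.slice exp none (some 3)) then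
            PySem.Set.add acc (String.ofList exp)
          else acc
        else acc) seen := by
  intro l
  induction l with
  | nil => intro seen d; simp [pvScan]
  | cons kv t ih =>
    intro seen d
    obtain ⟨col, values⟩ := kv
    simp only [List.foldl_cons]
    rw [pvStepEq]
    simp only [pvScan]
    cases hc : (col.toList.contains '_' && decide (4 ≤ (col.toList.takeWhile (· ≠ '_')).length) &&
        PySem.Chars.strIsalpha ((col.toList.takeWhile (· ≠ '_')).take 3)) with
    | true => simp only [if_true]; exact ih _ _
    | false => simp only [Bool.false_eq_true, if_false]; exact ih _ _

-- every prefix B's pass records is '_'-free and satisfies the validity condition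
theorem pvScanMem (e? : Option String) : ∀ (l : List (String × List Int))
    (seen : PySem.Set String) (d : PySem.Dict String (List Int)) (e : String),
    e ∈ (pvScan e? l seen d).1 →
    e ∈ seen ∨ ('_' ∉ e.toList ∧
      (decide (4 ≤ e.toList.length) && PySem.Chars.strIsalpha (e.toList.take 3)) = true) := by
  intro l
  induction l with
  | nil => intro seen d e h; exact Or.inl (by simpa [pvScan] using h)
  | cons kv t ih =>
    intro seen d e h
    obtain ⟨col, values⟩ := kv
    simp only [pvScan] at h
    by_cases hc : (col.toList.contains '_' && decide (4 ≤ (col.toList.takeWhile (· ≠ '_')).length) &&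
        PySem.Chars.strIsalpha ((col.toList.takeWhile (· ≠ '_')).take 3)) = true
    · rw [if_pos hc] at h
      rcases ih _ _ _ h with hmem | hprop
      · rw [PySem.Set.mem_add] at hmem
        rcases hmem with hmem | rfl
        · exact Or.inl hmem
        · right
          simp only [Bool.and_assoc, Bool.and_eq_true] at hc
          obtain ⟨-, h4, h3⟩ := hc
          rw [String.toList_ofList]
          refine ⟨?_, by rw [h4, h3]; rfl⟩
          intro hm
          have := List.mem_takeWhile_imp hm
          simp at this
      · exact Or.inr hprop
    · rw [if_neg hc] at h
      exact ih _ _ _ h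

-- when the requested expiry is a valid '_'-free prefix, the second component of B's pass
-- is exactly A's startswith-filter loop
theorem pvScanSnd (e : String) (he : '_' ∉ e.toList)
    (hcond : (decide (4 ≤ e.toList.length) && PySem.Chars.strIsalpha (e.toList.take 3)) = true) :
    ∀ (l : List (String × List Int)) (seen : PySem.Set String) (d : PySem.Dict String (List Int)),
    (pvScan (some e) l seen d).2
    = l.foldl (fun d kv =>
        if PySem.Chars.startswith kv.1.toList (e.toList ++ ['_']) then
          d.insert kv.1 kv.2
        else d) d := by
  have hcond' := hcond
  simp only [Bool.and_eq_true] at hcond'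
  obtain ⟨h4, h3⟩ := hcond'
  intro l
  induction l with
  | nil => intro seen d; simp [pvScan]
  | cons kv t ih =>
    intro seen d
    obtain ⟨col, values⟩ := kv
    by_cases hs : PySem.Chars.startswith col.toList (e.toList ++ ['_']) = true
    · obtain ⟨hin, hhead⟩ := (pvStartswithIff e.toList col.toList he).mp hs
      have hbig : (col.toList.contains '_' && decide (4 ≤ (col.toList.takeWhile (· ≠ '_')).length) &&
          PySem.Chars.strIsalpha ((col.toList.takeWhile (· ≠ '_')).take 3)) = true := by
        rw [hhead, hin, h4, h3]
        rfl
      have hbeq : (some e == some (String.ofList (col.toList.takeWhile (· ≠ '_')))) = true := by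
        rw [hhead, String.ofList_toList]
        exact beq_self_eq_true _
      simp only [pvScan, List.foldl_cons, hs, if_true, hbig, hbeq]
      exact ih _ _
    · by_cases hbig : (col.toList.contains '_' && decide (4 ≤ (col.toList.takeWhile (· ≠ '_')).length) &&
          PySem.Chars.strIsalpha ((col.toList.takeWhile (· ≠ '_')).take 3)) = true
      · have hin : col.toList.contains '_' = true := by
          simp only [Bool.and_assoc, Bool.and_eq_true] at hbig
          exact hbig.1
        have hbeq : (some e == some (String.ofList (col.toList.takeWhile (· ≠ '_')))) = false := by
          by_contra hbc
          simp only [Bool.not_eq_false, beq_iff_eq, Option.some.injEq] at hbc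
          have hx : col.toList.takeWhile (· ≠ '_') = e.toList := by
            rw [hbc, String.toList_ofList]
          exact hs ((pvStartswithIff e.toList col.toList he).mpr ⟨hin, hx⟩)
        simp only [pvScan, List.foldl_cons, hs, Bool.false_eq_true, if_false, hbig, if_true, hbeq]
        exact ih _ _
      · simp only [pvScan, List.foldl_cons, hs, Bool.false_eq_true, if_false]
        rw [if_neg hbig]
        exact ih _ _

theorem pvMain : ∀ (n : List (String × List Int)) (e? : Option String),
    filter_by_expiry_py n e? = filter_by_expiry_py_alt n e? := by
  intro n e?
  unfold filter_by_expiry_py filter_by_expiry_py_alt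
  cases n with
  | nil => simp
  | cons kv t =>
    simp only [List.isEmpty_cons, Bool.false_eq_true, if_false]
    rw [← pvScanFst e? (kv :: t) PySem.Set.empty PySem.Dict.empty]
    cases e? with
    | none => rfl
    | some e =>
      set s1 := (pvScan (some e) (kv :: t) PySem.Set.empty PySem.Dict.empty).1 with hs1
      have hs' : ((PySem.List.sorted s1 (fun x => x) false).contains e) = PySem.Set.contains s1 e := by
        rw [Bool.eq_iff_iff, PySem.Set.contains_iff]
        simp [PySem.List.mem_sorted]
      cases hb : ((!(e == "")) && PySem.Set.contains s1 e) with
      | false =>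
        have hA : (decide (e = "") || !((PySem.List.sorted s1 (fun x => x) false).contains e)) = true := by
          rw [hs']
          rcases Bool.and_eq_false_iff.mp hb with h1 | h2
          · have h0 : e = "" := by simpa using h1
            simp [h0]
          · simp only [h2, Bool.not_false, Bool.or_true]
        simp only [hA, hb, if_true, Bool.false_eq_true, if_false]
      | true =>
        have hb' := hb
        simp only [Bool.and_eq_true] at hb'
        obtain ⟨hne, hcont⟩ := hb'
        have hneq : ¬ (e = "") := by simpa using hne
        have hA : (decide (e = "") || !((PySem.List.sorted s1 (fun x => x) false).contains e)) = false := by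
          rw [hs', hcont]
          simp [hneq]
        simp only [hA, hb, Bool.false_eq_true, if_false, if_true]
        have hmem : e ∈ s1 := by rw [← PySem.Set.contains_iff]; exact hcont
        rcases pvScanMem (some e) (kv :: t) PySem.Set.empty PySem.Dict.empty e (hs1 ▸ hmem)
          with habs | ⟨he, hcond⟩
        · simp [PySem.Set.empty] at habs
        · rw [pvScanSnd e he hcond (kv :: t) PySem.Set.empty PySem.Dict.empty]

-- ===== VERDICT =====
theorem filter_by_expiry_py_spec : Claim_equal_filter_by_expiry_py := by
  intro normalized expiry _
  unfold Spec_filter_by_expiry_py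
  exact pvMain normalized expiry
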